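-- pv_equiv track=rewrite | github.com/thaddeus-git/nextjs-deepv-content | reference(to be removed)/docs/original-workflow/01_ingest_source_data.py | get_quality_answers
-- ===== SOURCE A (Python) =====
-- from typing import List, Dict, Any
--
-- def get_quality_answers(answers: List[Dict]) -> List[Dict]:
--     """
--     Enhanced answer selection - include all answers with votes > 0, minimum 3, maximum 8
--     """
--     if not answers:
--         return []
--
--     # Sort by votes descending
--     sorted_answers = sorted(answers, key=lambda x: x.get('votes', 0), reverse=True)
--
--     # Always include accepted answer if it exists
--     accepted = [a for a in sorted_answers if a.get('is_accepted', False)]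
--     voted = [a for a in sorted_answers if a.get('votes', 0) > 0 and not a.get('is_accepted', False)]
--
--     # Combine: accepted + voted answers
--     quality_answers = accepted + voted
--
--     # Ensure minimum 3 answers for better content generation
--     if len(quality_answers) < 3:
--         remaining = [a for a in sorted_answers if a not in quality_answers]
--         quality_answers.extend(remaining[:3-len(quality_answers)])
--
--     # Cap at maximum 8 to avoid overwhelming the AI
--     return quality_answers[:8]
-- ===== SOURCE B (Python) =====
-- def get_quality_answers(answers):
--     """Same selection via a double stable sort: rank by votes descending, then
--     stably reorder by priority category (accepted < positively voted < rest),
--     and cut with the closed-form bound max(3, min(8, n_quality))."""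
--     def cat(a):
--         return 0 if a.get('is_accepted', False) else (1 if a.get('votes', 0) > 0 else 2)
--     ranked = sorted(answers, key=lambda a: a.get('votes', 0), reverse=True)
--     ordered = sorted(ranked, key=cat)
--     n_quality = sum(cat(a) < 2 for a in answers)
--     return ordered[:max(3, min(8, n_quality))]
-- ===== Notes on version B (the rewrite author's own statement) =====
-- stated objective: alternative
-- what changed: Replaces A's two filter passes plus conditional back-fill (which rescans the sorted list with a 'not in' membership test) by a double stable sort (votes descending, then stably by priority category accepted < voted < rest) and the closed-form cutoff max(3, min(8, n_quality)).
import Mathlib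
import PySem

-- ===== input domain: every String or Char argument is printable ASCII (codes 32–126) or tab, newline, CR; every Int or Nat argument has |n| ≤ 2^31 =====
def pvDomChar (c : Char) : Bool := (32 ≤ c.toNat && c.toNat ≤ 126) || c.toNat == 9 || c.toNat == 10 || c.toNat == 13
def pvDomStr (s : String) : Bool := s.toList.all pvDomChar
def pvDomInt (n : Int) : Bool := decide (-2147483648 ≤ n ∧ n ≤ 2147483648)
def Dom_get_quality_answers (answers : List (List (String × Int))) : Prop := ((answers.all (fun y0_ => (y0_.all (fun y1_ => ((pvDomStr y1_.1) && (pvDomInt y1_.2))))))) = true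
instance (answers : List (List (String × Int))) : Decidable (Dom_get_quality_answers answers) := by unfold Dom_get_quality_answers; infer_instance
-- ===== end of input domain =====

-- B replaces A's filter passes and conditional back-fill by a double stable sort
-- (votes descending, then priority category) plus the closed-form cutoff
-- max(3, min(8, n_quality)); objective: alternative decomposition.

-- ===== PORT A =====
-- x.get('votes', 0) (dict values are Int under the type convention)
def pvVotes (a : List (String × Int)) : Int := (PySem.Dict.mk a).getD "votes" 0
-- truthiness of a.get('is_accepted', False): the Int value is truthy iff ≠ 0
def pvAcc (a : List (String × Int)) : Bool := (PySem.Dict.mk a).getD "is_accepted" 0 != 0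
-- Python 'a == b' on dicts: same key set and same value at every key, order ignored
-- (hand-written, exact for dicts, whose keys are unique)
def pyDictEq (a b : List (String × Int)) : Bool :=
  (a.map Prod.fst ++ b.map Prod.fst).all
    (fun k => (PySem.Dict.mk a).get? k == (PySem.Dict.mk b).get? k)

def get_quality_answers (answers : List (List (String × Int))) : List (List (String × Int)) :=
  if answers = [] then []
  else
    let sorted_answers := PySem.List.sorted answers (fun x => pvVotes x) true
    let accepted := sorted_answers.filter (fun a => pvAcc a)
    let voted := sorted_answers.filter (fun a => decide (pvVotes a > 0) && !pvAcc a)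
    let quality := accepted ++ voted
    let quality :=
      if quality.length < 3 then
        let remaining := sorted_answers.filter (fun a => !(quality.any (fun b => pyDictEq a b)))
        quality ++ remaining.take (3 - quality.length)
      else quality
    quality.take 8

-- ===== PORT B =====
-- Source B's cat(a): 0 accepted, 1 positively voted, 2 rest
def pvCat (a : List (String × Int)) : Int :=
  if pvAcc a then 0 else if pvVotes a > 0 then 1 else 2

def get_quality_answers_alt (answers : List (List (String × Int))) : List (List (String × Int)) :=
  let ranked := PySem.List.sorted answers (fun a => pvVotes a) true
  let ordered := PySem.List.sorted ranked (fun a => pvCat a) false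
  let n_quality := answers.countP (fun a => decide (pvCat a < 2))
  ordered.take (max 3 (min 8 n_quality))

-- ===== PRECONDITION & SPEC =====
def Spec_get_quality_answers (answers : List (List (String × Int))) (out : List (List (String × Int))) : Prop := out = get_quality_answers_alt answers
instance (answers : List (List (String × Int))) (out : List (List (String × Int))) : Decidable (Spec_get_quality_answers answers out) := by unfold Spec_get_quality_answers; infer_instance

-- ===== CLAIM (what is proved, stated in full; the proofs are below) =====
def Claim_equal_get_quality_answers : Prop := ∀ (answers : List (List (String × Int))), Dom_get_quality_answers answers → Spec_get_quality_answers answers (get_quality_answers answers)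

-- ===== LEMMAS AND PROOFS =====

-- predicates of the three priority categories
def pvP0 (a : List (String × Int)) : Bool := pvAcc a
def pvP1 (a : List (String × Int)) : Bool := !pvAcc a && decide (pvVotes a > 0)
def pvP2 (a : List (String × Int)) : Bool := !pvAcc a && !decide (pvVotes a > 0)

theorem pvCat_p0 {a : List (String × Int)} (h : pvP0 a = true) : pvCat a = 0 := by
  simp only [pvP0] at h; simp [pvCat, h]
theorem pvCat_p1 {a : List (String × Int)} (h : pvP1 a = true) : pvCat a = 1 := by
  simp only [pvP1, Bool.and_eq_true, Bool.not_eq_eq_eq_not, Bool.not_true,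
    decide_eq_true_eq] at h
  simp [pvCat, h.1, h.2]
theorem pvCat_p2 {a : List (String × Int)} (h : pvP2 a = true) : pvCat a = 2 := by
  simp only [pvP2, Bool.and_eq_true, Bool.not_eq_eq_eq_not, Bool.not_true,
    decide_eq_false_iff_not] at h
  simp [pvCat, h.1, h.2]

theorem pvP_cases (a : List (String × Int)) :
    pvP0 a = true ∨ (pvP0 a = false ∧ pvP1 a = true) ∨
    (pvP0 a = false ∧ pvP1 a = false ∧ pvP2 a = true) := by
  simp only [pvP0, pvP1, pvP2]
  cases h : pvAcc a <;> cases h1 : decide (pvVotes a > 0) <;> simp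

theorem pyDictEq_refl (a : List (String × Int)) : pyDictEq a a = true := by
  simp [pyDictEq]

theorem pyDictEq_get? {a b : List (String × Int)} (h : pyDictEq a b = true) (k : String) :
    (PySem.Dict.mk a).get? k = (PySem.Dict.mk b).get? k := by
  by_cases hk : k ∈ a.map Prod.fst ++ b.map Prod.fst
  · have := List.all_eq_true.mp h k hk
    simpa using this
  · rw [List.mem_append] at hk
    rw [(PySem.Dict.get?_eq_none_iff_not_mem_keys _ _).mpr
          (by simp only [PySem.Dict.keys_mk]; exact fun hm => hk (Or.inl hm)),
        (PySem.Dict.get?_eq_none_iff_not_mem_keys _ _).mpr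
          (by simp only [PySem.Dict.keys_mk]; exact fun hm => hk (Or.inr hm))]

theorem pyDictEq_votes {a b : List (String × Int)} (h : pyDictEq a b = true) :
    pvVotes a = pvVotes b := by
  simp only [pvVotes, PySem.Dict.getD_eq_get?_getD, pyDictEq_get? h]

theorem pyDictEq_acc {a b : List (String × Int)} (h : pyDictEq a b = true) :
    pvAcc a = pvAcc b := by
  simp only [pvAcc, PySem.Dict.getD_eq_get?_getD, pyDictEq_get? h]

-- A's 'remaining' filter is exactly the third bucket
theorem remaining_eq (S : List (List (String × Int))) :
    S.filter (fun a => !((S.filter (fun a => pvAcc a) ++ S.filter (fun a => decide (pvVotes a > 0) && !pvAcc a)).any (fun b => pyDictEq a b)))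
    = S.filter pvP2 := by
  apply List.filter_congr
  intro a ha
  by_cases h2 : pvP2 a = true
  · rw [h2, Bool.not_eq_eq_eq_not, Bool.not_true, List.any_eq_false]
    intro b hb
    simp only [pvP2, Bool.and_eq_true, Bool.not_eq_eq_eq_not, Bool.not_true,
      decide_eq_false_iff_not, not_lt] at h2
    intro hne
    rcases List.mem_append.mp hb with hb | hb
    · have hpb := (List.mem_filter.mp hb).2
      rw [pyDictEq_acc hne, hpb] at h2
      simp at h2
    · have hpb := (List.mem_filter.mp hb).2
      simp only [Bool.and_eq_true, decide_eq_true_eq] at hpb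
      rw [pyDictEq_votes hne] at h2
      exact absurd hpb.1 (not_lt.mpr h2.2)
  · rw [Bool.not_eq_true] at h2
    rw [h2, Bool.not_eq_eq_eq_not, Bool.not_false, List.any_eq_true]
    refine ⟨a, ?_, pyDictEq_refl a⟩
    by_cases hacc : pvAcc a = true
    · exact List.mem_append.mpr (.inl (List.mem_filter.mpr ⟨ha, hacc⟩))
    · refine List.mem_append.mpr (.inr (List.mem_filter.mpr ⟨ha, ?_⟩))
      simp only [pvP2, Bool.and_eq_false_iff, Bool.not_eq_eq_eq_not, Bool.not_false] at h2
      rcases h2 with h | h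
      · exact absurd h (by simpa using hacc)
      · simp only [Bool.and_eq_true, Bool.not_eq_eq_eq_not, Bool.not_true]
        exact ⟨by simpa using h, by simpa using hacc⟩

theorem voted_eq (S : List (List (String × Int))) :
    S.filter (fun a => decide (pvVotes a > 0) && !pvAcc a) = S.filter pvP1 := by
  apply List.filter_congr
  intro a _
  simp [pvP1, Bool.and_comm]

-- inserting x between a prefix it does not go before and a suffix it goes before
theorem insertBy_middle {α : Type} (before : α → α → Bool) (x : α) (ys zs : List α)
    (h1 : ∀ y ∈ ys, before x y = false) (h2 : ∀ z ∈ zs, before x z = true) :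
    PySem.List.insertBy before x (ys ++ zs) = ys ++ x :: zs := by
  induction ys with
  | nil =>
    cases zs with
    | nil => simp [PySem.List.insertBy_of_forall_not_before]
    | cons z zs =>
      have := h2 z (by simp)
      simp [PySem.List.insertBy, this]
  | cons y ys ih =>
    have hy := h1 y (by simp)
    simp only [List.cons_append, PySem.List.insertBy, hy, Bool.false_eq_true, if_false,
      List.cons.injEq, true_and]
    exact ih (fun y hy => h1 y (by simp [hy]))

-- the insertion-sort fold by category grows the three category buckets in order
theorem foldl_insert_cat (S f0 f1 f2 : List (List (String × Int)))
    (h0 : ∀ x ∈ f0, pvCat x = 0) (h1 : ∀ x ∈ f1, pvCat x = 1) (h2 : ∀ x ∈ f2, pvCat x = 2) :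
    S.foldl (fun acc x => PySem.List.insertBy (fun a b => decide (pvCat a < pvCat b)) x acc)
      (f0 ++ f1 ++ f2)
    = (f0 ++ S.filter pvP0) ++ (f1 ++ S.filter pvP1) ++ (f2 ++ S.filter pvP2) := by
  induction S generalizing f0 f1 f2 with
  | nil => simp
  | cons x S ih =>
    simp only [List.foldl_cons]
    rcases pvP_cases x with c0 | ⟨c0, c1⟩ | ⟨c0, c1, c2⟩
    · have hx := pvCat_p0 c0
      have hn1 : pvP1 x = false := by
        simp only [pvP0] at c0; simp [pvP1, c0]
      have hn2 : pvP2 x = false := by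
        simp only [pvP0] at c0; simp [pvP2, c0]
      rw [List.append_assoc f0 f1 f2,
          insertBy_middle _ x f0 (f1 ++ f2)
            (fun y hy => by simp [hx, h0 y hy])
            (fun z hz => by
              rcases List.mem_append.mp hz with h | h
              · simp [hx, h1 z h]
              · simp [hx, h2 z h]),
          show f0 ++ x :: (f1 ++ f2) = (f0 ++ [x]) ++ f1 ++ f2 by simp,
          ih (f0 ++ [x]) f1 f2
            (fun y hy => by
              rcases List.mem_append.mp hy with h | h
              · exact h0 y h
              · simp only [List.mem_singleton] at h; subst h; exact hx)
            h1 h2]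
      simp [c0, hn1, hn2]
    · have hx := pvCat_p1 c1
      rw [insertBy_middle _ x (f0 ++ f1) f2
            (fun y hy => by
              rcases List.mem_append.mp hy with h | h
              · simp [hx, h0 y h]
              · simp [hx, h1 y h])
            (fun z hz => by simp [hx, h2 z hz]),
          show (f0 ++ f1) ++ x :: f2 = f0 ++ (f1 ++ [x]) ++ f2 by simp,
          ih f0 (f1 ++ [x]) f2 h0
            (fun y hy => by
              rcases List.mem_append.mp hy with h | h
              · exact h1 y h
              · simp only [List.mem_singleton] at h; subst h; exact hx)
            h2]
      simp [c0, c1, show pvP2 x = false by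
        simp only [pvP1, Bool.and_eq_true, Bool.not_eq_eq_eq_not, Bool.not_true] at c1
        simp [pvP2, c1.1, c1.2]]
    · have hx := pvCat_p2 c2
      rw [show f0 ++ f1 ++ f2 = (f0 ++ f1 ++ f2) ++ ([] : List (List (String × Int))) by simp,
          insertBy_middle _ x (f0 ++ f1 ++ f2) []
            (fun y hy => by
              rcases List.mem_append.mp hy with h | h
              · rcases List.mem_append.mp h with h' | h'
                · simp [hx, h0 y h']
                · simp [hx, h1 y h']
              · simp [hx, h2 y h])
            (fun z hz => by simp at hz),
          show (f0 ++ f1 ++ f2) ++ x :: [] = f0 ++ f1 ++ (f2 ++ [x]) by simp,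
          ih f0 f1 (f2 ++ [x]) h0 h1
            (fun y hy => by
              rcases List.mem_append.mp hy with h | h
              · exact h2 y h
              · simp only [List.mem_singleton] at h; subst h; exact hx)]
      simp [c0, c1, c2]

-- Source B's stable category sort is the concatenation of the three category filters
theorem sorted_cat_eq (S : List (List (String × Int))) :
    PySem.List.sorted S (fun a => pvCat a) false
      = S.filter pvP0 ++ S.filter pvP1 ++ S.filter pvP2 := by
  rw [PySem.List.sorted_eq_foldl_insertBy]
  have := foldl_insert_cat S [] [] [] (by simp) (by simp) (by simp)
  simpa using this

-- countP of 'cat < 2' splits into the first two buckets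
theorem countP_cat_split (S : List (List (String × Int))) :
    S.countP (fun a => decide (pvCat a < 2)) = S.countP pvP0 + S.countP pvP1 := by
  induction S with
  | nil => simp
  | cons x S ih =>
    simp only [List.countP_cons, ih]
    rcases pvP_cases x with c0 | ⟨c0, c1⟩ | ⟨c0, c1, c2⟩
    · have hn1 : pvP1 x = false := by
        simp only [pvP0] at c0; simp [pvP1, c0]
      simp only [pvCat_p0 c0, c0, hn1]
      norm_num
      omega
    · simp only [pvCat_p1 c1, c0, c1]
      norm_num
      omega
    · simp only [pvCat_p2 c2, c0, c1]
      norm_num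

-- the closed-form cutoff equals A's back-fill-then-cap
theorem take_cut {α : Type} (f0 f1 f2 : List α) :
    (if (f0 ++ f1).length < 3 then
        (f0 ++ f1) ++ f2.take (3 - (f0 ++ f1).length)
      else f0 ++ f1).take 8
    = ((f0 ++ f1) ++ f2).take (max 3 (min 8 (f0.length + f1.length))) := by
  have hn : (f0 ++ f1).length = f0.length + f1.length := List.length_append
  rw [List.take_append, hn]
  split_ifs with h
  · have h3 : max 3 (min 8 (f0.length + f1.length)) = 3 := by omega
    rw [h3, List.take_of_length_le (l := f0 ++ f1) (by omega),
        List.take_of_length_le (by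
          rw [List.length_append, hn, List.length_take]; omega)]
  · have h3 : max 3 (min 8 (f0.length + f1.length)) = min 8 (f0.length + f1.length) := by omega
    rw [h3, Nat.sub_eq_zero_of_le (by omega), List.take_zero, List.append_nil,
        ← hn, List.take_eq_take_min]

-- ===== VERDICT (by name: the statement is the Claim_ definition above) =====
theorem get_quality_answers_spec : Claim_equal_get_quality_answers := by
  intro answers _
  unfold Spec_get_quality_answers get_quality_answers get_quality_answers_alt
  by_cases hnil : answers = []
  · subst hnil; decide
  · simp only [if_neg hnil, sorted_cat_eq]
    rw [remaining_eq, voted_eq,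
        show (fun a : List (String × Int) => pvAcc a) = pvP0 from rfl]
    set S := PySem.List.sorted answers (fun x => pvVotes x) true with hS
    have hcnt : answers.countP (fun a => decide (pvCat a < 2))
        = (S.filter pvP0).length + (S.filter pvP1).length := by
      rw [← List.countP_eq_length_filter, ← List.countP_eq_length_filter,
          ← countP_cat_split,
          (PySem.List.sorted_perm answers (fun x => pvVotes x) true).countP_eq]
    rw [hcnt]
    exact take_cut (S.filter pvP0) (S.filter pvP1) (S.filter pvP2)
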